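-- pv_equiv track=rewrite | github.com/jjpp/aoc | 2015/11/pass.py | has_pairs
-- ===== SOURCE A (Python) =====
-- def has_pairs(p):
--     fp = None
--     for i in range(0, 7):
--         if p[i] != p[i+1]:
--             continue
--         if fp == None:
--             fp = i
--         elif i > fp + 1:
--             return True
--     return False
-- ===== SOURCE B (Python) =====
-- def has_pairs(p):
--     # Greedy recursive pair counter: walk the pair-start positions 0..6,
--     # consume both characters of each pair found (skip 2), and report
--     # whether at least two non-overlapping pairs were counted.
--     def count(i):
--         if i >= 7:
--             return 0
--         if p[i] == p[i+1]:
--             return 1 + count(i+2)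
--         return count(i+1)
--     return count(0) >= 2
-- ===== Notes on version B (the rewrite author's own statement) =====
-- stated objective: alternative
-- what changed: Replaces A's stateful scan (first-pair index fp, comparison i > fp+1, early return) with a recursive greedy counter that consumes both characters of each pair it finds (advancing by 2) and returns whether it counted at least two non-overlapping pairs.
-- outside the precondition, e.g. on has_pairs('aabb'): A returns True, B raises IndexError
import Mathlib
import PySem

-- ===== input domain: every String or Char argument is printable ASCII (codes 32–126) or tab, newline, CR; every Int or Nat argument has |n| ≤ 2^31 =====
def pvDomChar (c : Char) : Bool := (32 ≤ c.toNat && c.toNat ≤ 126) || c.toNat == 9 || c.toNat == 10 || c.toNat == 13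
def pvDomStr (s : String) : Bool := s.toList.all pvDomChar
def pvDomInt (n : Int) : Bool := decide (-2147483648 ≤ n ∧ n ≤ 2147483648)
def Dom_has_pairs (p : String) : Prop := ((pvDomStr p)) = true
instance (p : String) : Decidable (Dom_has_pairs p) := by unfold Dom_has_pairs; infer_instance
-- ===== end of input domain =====

-- B replaces A's stateful scan (fp state + early return) with a recursive
-- greedy counter that consumes both characters of each pair it finds and
-- returns whether it counted at least two non-overlapping pairs.

-- ===== PORT A =====
-- the for-loop over range(0,7) with state fp (Option = Python None) and early return True
def hasPairsLoopA (p : String) : List Int → Option Int → Bool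
  | [], _ => false
  | i :: rest, fp =>
    if PySem.Str.pyGet? p i != PySem.Str.pyGet? p (i+1) then
      hasPairsLoopA p rest fp
    else
      match fp with
      | none => hasPairsLoopA p rest (some i)
      | some f => if i > f + 1 then true else hasPairsLoopA p rest fp

def has_pairs (p : String) : Bool :=
  hasPairsLoopA p (PySem.List.pyRange 0 7 1) none

-- ===== PORT B =====
-- the recursive helper count(i): i>=7 -> 0; p[i]==p[i+1] -> 1+count(i+2); else count(i+1)
def countPairsB (p : String) (i : Int) : Int :=
  if h : 7 ≤ i then 0
  else if PySem.Str.pyGet? p i == PySem.Str.pyGet? p (i+1) then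
    1 + countPairsB p (i+2)
  else
    countPairsB p (i+1)
termination_by (7 - i).toNat
decreasing_by all_goals omega

def has_pairs_alt (p : String) : Bool :=
  decide (2 ≤ countPairsB p 0)

-- ===== PRECONDITION & SPEC =====
-- Pre_ excludes strings shorter than 8 characters: there the index access
-- p[i+1] raises IndexError (in both programs) unless a True is returned first.
def Pre_has_pairs (p : String) : Prop := 8 ≤ p.toList.length
instance (p : String) : Decidable (Pre_has_pairs p) := by unfold Pre_has_pairs; infer_instance
def pvWitness_has_pairs : String := "aabbcdef"

def Spec_has_pairs (p : String) (out : Bool) : Prop := out = has_pairs_alt p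
instance (p : String) (out : Bool) : Decidable (Spec_has_pairs p out) := by unfold Spec_has_pairs; infer_instance

-- ===== CLAIM =====
def Claim_equal_has_pairs : Prop := ∀ (p : String), Dom_has_pairs p → Pre_has_pairs p → Spec_has_pairs p (has_pairs p)

-- ===== LEMMAS AND PROOFS =====
theorem pyRange07 : PySem.List.pyRange 0 7 1 = [0,1,2,3,4,5,6] := by decide

-- ===== VERDICT =====
theorem has_pairs_spec : Claim_equal_has_pairs := by
  intro p _ _
  unfold Spec_has_pairs has_pairs has_pairs_alt
  rw [pyRange07]
  have e : ∀ i : Int, ¬ 7 ≤ i → countPairsB p i =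
      (if PySem.Str.pyGet? p i == PySem.Str.pyGet? p (i+1) then 1 + countPairsB p (i+2)
       else countPairsB p (i+1)) := by
    intro i h
    rw [countPairsB]
    simp [h]
  have e7 : ∀ i : Int, 7 ≤ i → countPairsB p i = 0 := by
    intro i h
    rw [countPairsB]
    simp [h]
  simp only [hasPairsLoopA, bne, Int.reduceAdd,
    e 0 (by norm_num), e 1 (by norm_num), e 2 (by norm_num), e 3 (by norm_num),
    e 4 (by norm_num), e 5 (by norm_num), e 6 (by norm_num),
    e7 7 (by norm_num), e7 8 (by norm_num)]
  generalize (PySem.Str.pyGet? p 0 == PySem.Str.pyGet? p 1) = b0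
  generalize (PySem.Str.pyGet? p 1 == PySem.Str.pyGet? p 2) = b1
  generalize (PySem.Str.pyGet? p 2 == PySem.Str.pyGet? p 3) = b2
  generalize (PySem.Str.pyGet? p 3 == PySem.Str.pyGet? p 4) = b3
  generalize (PySem.Str.pyGet? p 4 == PySem.Str.pyGet? p 5) = b4
  generalize (PySem.Str.pyGet? p 5 == PySem.Str.pyGet? p 6) = b5
  generalize (PySem.Str.pyGet? p 6 == PySem.Str.pyGet? p 7) = b6
  revert b0 b1 b2 b3 b4 b5 b6
  decide
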